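-- pv_equiv track=rewrite | github.com/DJamesVersion/loaprogs | Tahkmahnelle_MegaViz.py | render_spatial_grid
-- ===== SOURCE A (Python) =====
-- def render_spatial_grid(x, y, z):
--     """Renders a simplified ASCII 3D coordinate space visualization."""
--
--     MAX_COORD = 10
--     x_display = min(MAX_COORD, max(0, x))
--     y_display = min(MAX_COORD, max(0, y))
--     z_display = min(MAX_COORD, max(0, z))
--
--     grid = []
--
--     # Y-axis (vertical) - 11 lines (0 to 10)
--     for row in range(MAX_COORD + 1):
--         line = list("." * (MAX_COORD * 2 + 1))
--
--         # Mark Y-axis label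
--         if row == MAX_COORD // 2:
--             line.insert(0, 'Y')
--         else:
--             line.insert(0, ' ')
--
--         # Draw the Z-axis (depth) projection line (runs diagonally up-left from origin (0,0))
--         # This is a very rough representation
--
--         # Place the current location marker '@'
--         if row == MAX_COORD - y_display:
--             # X position is doubled for better ASCII spacing
--             x_pos = 1 + x_display * 2
--
--             # Apply Z offset (pushing the marker diagonally up-left for perspective)
--             # This is complex in 2D ASCII, so we simplify the horizontal displacement
--             x_pos -= z_display // 2
--
--             x_pos = max(1, min(len(line) - 1, x_pos))
--
--             if 0 < x_pos < len(line) and 0 <= row < MAX_COORD + 1: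
--                 line[x_pos] = '@'
--
--         grid.append("".join(line))
--
--     # Add X-axis label (horizontal)
--     x_axis_label = " " + "0" + "--" * (MAX_COORD // 2) + "X" + "--" * (MAX_COORD // 2)
--     grid.append(x_axis_label)
--
--     # Key
--     key = (
--         f"Current Spatial Location: X={x}, Y={y}, Z={z}\n"
--         f"Axes: Resources (X) | Knowledge (Y) | Depth (Z) | Range: (0-{MAX_COORD})"
--     )
--
--     return "\n".join(grid), key
-- ===== SOURCE B (Python) =====
-- def render_spatial_grid(x, y, z):
--     """Renders a simplified ASCII 3D coordinate space visualization."""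
--     MAX_COORD = 10
--     xd = min(MAX_COORD, max(0, x))
--     yd = min(MAX_COORD, max(0, y))
--     zd = min(MAX_COORD, max(0, z))
--
--     # marker cell, computed once in closed form
--     mrow = MAX_COORD - yd
--     mcol = min(2 * MAX_COORD + 1, max(1, 1 + 2 * xd - zd // 2))
--
--     # every character of the picture is a pure function of its (row, col) position
--     def cell(r, c):
--         if r == mrow and c == mcol:
--             return '@'
--         if c == 0:
--             return 'Y' if r == MAX_COORD // 2 else ' '
--         return '.'
--
--     def axis(c):
--         if c == 0:
--             return ' '
--         if c == 1:
--             return '0'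
--         if c == MAX_COORD + 2:
--             return 'X'
--         return '-'
--
--     width = 2 * MAX_COORD + 2
--     lines = ["".join(cell(r, c) for c in range(width)) for r in range(MAX_COORD + 1)]
--     lines.append("".join(axis(c) for c in range(width + 1)))
--
--     key = (
--         f"Current Spatial Location: X={x}, Y={y}, Z={z}\n"
--         f"Axes: Resources (X) | Knowledge (Y) | Depth (Z) | Range: (0-{MAX_COORD})"
--     )
--     return "\n".join(lines), key
-- ===== Notes on version B (the rewrite author's own statement) =====
-- stated objective: alternative
-- what changed: A imperatively builds each row as a mutable char list (replicate dots, insert a prefix, conditionally assign the marker); B renders the picture as a pure function of position: every character is cell(row, col) computed independently from the closed-form marker coordinates, with no list mutation at all.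
import Mathlib
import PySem

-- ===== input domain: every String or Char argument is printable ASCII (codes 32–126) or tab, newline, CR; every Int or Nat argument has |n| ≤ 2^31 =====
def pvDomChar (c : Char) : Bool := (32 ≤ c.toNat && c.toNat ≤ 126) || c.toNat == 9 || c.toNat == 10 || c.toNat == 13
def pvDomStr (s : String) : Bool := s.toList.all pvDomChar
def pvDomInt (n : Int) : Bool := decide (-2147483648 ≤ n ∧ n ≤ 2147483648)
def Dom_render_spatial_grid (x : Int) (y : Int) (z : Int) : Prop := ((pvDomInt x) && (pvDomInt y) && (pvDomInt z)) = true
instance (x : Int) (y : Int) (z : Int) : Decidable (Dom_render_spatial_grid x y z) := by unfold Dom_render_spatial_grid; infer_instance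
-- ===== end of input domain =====

-- B renders every character of the picture as a pure function of its (row, col) position,
-- computed from the closed-form marker coordinates, instead of A's mutable per-row list
-- building (replicate/insert/assign). Objective: alternative decomposition, no mutation.

-- ===== PORT A =====
-- shared key builder: the identical f-string of both Pythons
def pvKey (x : Int) (y : Int) (z : Int) : String :=
  "Current Spatial Location: X=" ++ PySem.Int.toStr x ++ ", Y=" ++ PySem.Int.toStr y ++
  ", Z=" ++ PySem.Int.toStr z ++ "\n" ++
  "Axes: Resources (X) | Knowledge (Y) | Depth (Z) | Range: (0-10)"

-- the grid part of A (first component), a function of the clamped coordinates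
def pvLinesA (xd : Int) (yd : Int) (zd : Int) : String :=
  let grid := (PySem.List.pyRange 0 (10 + 1) 1).foldl (fun g row =>
    let line : List Char := List.replicate (10 * 2 + 1) '.'
    let line := if row = PySem.Int.floordiv 10 2 then PySem.List.insert line 0 'Y'
                else PySem.List.insert line 0 ' '
    let line :=
      if row = 10 - yd then
        let xpos := 1 + xd * 2
        let xpos := xpos - PySem.Int.floordiv zd 2
        let xpos := max 1 (min ((line.length : Int) - 1) xpos)
        if 0 < xpos ∧ xpos < (line.length : Int) ∧ 0 ≤ row ∧ row < 10 + 1 then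
          line.set xpos.toNat '@'   -- Python item assignment; the guard makes it in range, toNat exact since 0 < xpos
        else line
      else line
    g ++ [String.ofList line]) ([] : List String)
  let x_axis := String.ofList (' ' :: '0' :: (List.replicate 5 ['-', '-']).flatten ++
                           'X' :: (List.replicate 5 ['-', '-']).flatten)
  PySem.Str.join "\n" (grid ++ [x_axis])

def render_spatial_grid (x : Int) (y : Int) (z : Int) : String × String :=
  let x_display := min 10 (max 0 x)
  let y_display := min 10 (max 0 y)
  let z_display := min 10 (max 0 z)
  (pvLinesA x_display y_display z_display, pvKey x y z)

-- ===== PORT B =====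
-- B's cell function: the character at (r, c) of the grid
def pvCell (mrow mcol : Int) (r c : Int) : Char :=
  if r = mrow ∧ c = mcol then '@'
  else if c = 0 then (if r = PySem.Int.floordiv 10 2 then 'Y' else ' ')
  else '.'

-- B's axis function: the character at column c of the axis line
def pvAxis (c : Int) : Char :=
  if c = 0 then ' ' else if c = 1 then '0' else if c = 10 + 2 then 'X' else '-'

-- the grid part of B: each line is a map of the pure cell function over the columns
def pvLinesB (xd : Int) (yd : Int) (zd : Int) : String :=
  let mrow := 10 - yd
  let mcol := min (2 * 10 + 1) (max 1 (1 + 2 * xd - PySem.Int.floordiv zd 2))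
  let lines := (PySem.List.pyRange 0 (10 + 1) 1).map (fun r =>
    String.ofList ((PySem.List.pyRange 0 (2 * 10 + 2) 1).map (pvCell mrow mcol r)))
  let lines := lines ++ [String.ofList ((PySem.List.pyRange 0 (2 * 10 + 2 + 1) 1).map pvAxis)]
  PySem.Str.join "\n" lines

def render_spatial_grid_alt (x : Int) (y : Int) (z : Int) : String × String :=
  let x_display := min 10 (max 0 x)
  let y_display := min 10 (max 0 y)
  let z_display := min 10 (max 0 z)
  (pvLinesB x_display y_display z_display, pvKey x y z)

-- ===== PRECONDITION & SPEC =====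
def Spec_render_spatial_grid (x : Int) (y : Int) (z : Int) (out : String × String) : Prop := out = render_spatial_grid_alt x y z
instance (x : Int) (y : Int) (z : Int) (out : String × String) : Decidable (Spec_render_spatial_grid x y z out) := by unfold Spec_render_spatial_grid; infer_instance

-- ===== CLAIM (what is proved, stated in full; the proofs are below) =====
def Claim_equal_render_spatial_grid : Prop := ∀ (x : Int) (y : Int) (z : Int), Dom_render_spatial_grid x y z → Spec_render_spatial_grid x y z (render_spatial_grid x y z)

-- ===== LEMMAS AND PROOFS =====
-- B's row maps collapse to A's concrete row lists, case by case on the row kind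
lemma mapB_plain_space (mrow mcol r : Int) (hne : r ≠ mrow) (h5 : r ≠ 5) :
    List.map (pvCell mrow mcol r) (PySem.List.pyRange 0 22 1) = ' ' :: List.replicate 21 '.' := by
  have h : PySem.List.pyRange 0 22 1 = [0,1,2,3,4,5,6,7,8,9,10,11,12,13,14,15,16,17,18,19,20,21] := by decide
  simp [h, pvCell, hne, h5]

lemma mapB_plain_Y (mrow mcol : Int) (hne : (5:Int) ≠ mrow) :
    List.map (pvCell mrow mcol 5) (PySem.List.pyRange 0 22 1) = 'Y' :: List.replicate 21 '.' := by
  have h : PySem.List.pyRange 0 22 1 = [0,1,2,3,4,5,6,7,8,9,10,11,12,13,14,15,16,17,18,19,20,21] := by decide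
  simp [h, pvCell, hne]

lemma mapB_marked (r mcol : Int) (h1 : 1 ≤ mcol) (h2 : mcol ≤ 21) :
    List.map (pvCell r mcol r) (PySem.List.pyRange 0 22 1)
    = ((if r = 5 then 'Y' else ' ') :: List.replicate 21 '.').set mcol.toNat '@' := by
  have h : PySem.List.pyRange 0 22 1 = [0,1,2,3,4,5,6,7,8,9,10,11,12,13,14,15,16,17,18,19,20,21] := by decide
  interval_cases mcol <;> simp [h, pvCell]

lemma axisB : List.map pvAxis (PySem.List.pyRange 0 (2 * 10 + 2 + 1) 1)
    = ' ' :: '0' :: ((List.replicate 5 ['-', '-']).flatten ++ 'X' :: (List.replicate 5 ['-', '-']).flatten) := by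
  decide

-- the grid parts agree for any clamped y-coordinate; x and z enter only through the
-- clamped marker column, which is generalized to m ∈ [1, 21] before the row rewrites
set_option maxRecDepth 8000 in
set_option maxHeartbeats 1000000 in
lemma pvLines_eq (xd : Int) (yd : Int) (zd : Int) (hy0 : 0 ≤ yd) (hy1 : yd ≤ 10) :
    pvLinesA xd yd zd = pvLinesB xd yd zd := by
  have hrange : PySem.List.pyRange 0 (10 + 1) 1 = [0, 1, 2, 3, 4, 5, 6, 7, 8, 9, 10] := by decide
  simp only [pvLinesA, pvLinesB, hrange, PySem.List.foldl_append_singleton_eq_map, axisB]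
  interval_cases yd <;>
  · simp only [List.map, PySem.List.insert_zero]
    norm_num
    rw [show max 1 (min 21 (1 + xd * 2 - zd / 2)) = min 21 (max 1 (1 + 2 * xd - zd / 2)) from by omega]
    have h1 : (1:Int) ≤ min 21 (max 1 (1 + 2 * xd - zd / 2)) := by omega
    have h2 : min 21 (max 1 (1 + 2 * xd - zd / 2)) ≤ 21 := by omega
    generalize hm : min 21 (max 1 (1 + 2 * xd - zd / 2)) = m at h1 h2 ⊢
    rw [mapB_marked _ _ h1 h2]
    norm_num [mapB_plain_space, mapB_plain_Y]

-- ===== VERDICT (by name: the statement is the Claim_ definition above) =====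
theorem render_spatial_grid_spec : Claim_equal_render_spatial_grid := by
  intro x y z _
  unfold Spec_render_spatial_grid render_spatial_grid render_spatial_grid_alt
  have h := pvLines_eq (min 10 (max 0 x)) (min 10 (max 0 y)) (min 10 (max 0 z))
    (by omega) (by omega)
  simp [h]
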